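-- pv_equiv track=rewrite | github.com/chardon-labs/metagemma | sandbox_harness/src/sandbox_harness/prompt.py | _build_guidelines
-- ===== SOURCE A (Python) =====
-- from collections.abc import Mapping, Sequence
--
-- PI_TOOL_GUIDELINES = {
--     "read": ("Use read to examine files instead of cat or sed.",),
--     "edit": (
--         "Use edit for precise changes (edits[].oldText must match exactly)",
--         "When changing multiple separate locations in one file, use one edit call with multiple entries in edits[] instead of multiple edit calls",
--         "Each edits[].oldText is matched against the original file, not after earlier edits are applied. Do not emit overlapping or nested edits. Merge nearby changes into one edit.",
--         "Keep edits[].oldText as small as possible while still being unique in the file. Do not pad with large unchanged regions.",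
--     ),
--     "write": ("Use write only for new files or complete rewrites.",),
-- }
--
-- def _build_guidelines(selected_tools: Sequence[str], extra_guidelines: Sequence[str]) -> list[str]:
--     guidelines: list[str] = []
--     seen: set[str] = set()
--
--     def add(guideline: str) -> None:
--         if guideline in seen:
--             return
--         seen.add(guideline)
--         guidelines.append(guideline)
--
--     has_bash = "bash" in selected_tools
--     has_grep = "grep" in selected_tools
--     has_find = "find" in selected_tools
--     has_ls = "ls" in selected_tools
--     if has_bash and not has_grep and not has_find and not has_ls:
--         add("Use bash for file operations like ls, rg, find")
--     elif has_bash and (has_grep or has_find or has_ls):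
--         add("Prefer grep/find/ls tools over bash for file exploration (faster, respects .gitignore)")
--
--     for name in selected_tools:
--         for guideline in PI_TOOL_GUIDELINES.get(name, ()):
--             add(guideline)
--     for guideline in extra_guidelines:
--         normalized = guideline.strip()
--         if normalized:
--             add(normalized)
--     add("Be concise in your responses")
--     add("Show file paths clearly when working with files")
--     return guidelines
-- ===== SOURCE B (Python) =====
-- from collections.abc import Mapping, Sequence
--
-- PI_TOOL_GUIDELINES = {
--     "read": ("Use read to examine files instead of cat or sed.",),
--     "edit": (
--         "Use edit for precise changes (edits[].oldText must match exactly)",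
--         "When changing multiple separate locations in one file, use one edit call with multiple entries in edits[] instead of multiple edit calls",
--         "Each edits[].oldText is matched against the original file, not after earlier edits are applied. Do not emit overlapping or nested edits. Merge nearby changes into one edit.",
--         "Keep edits[].oldText as small as possible while still being unique in the file. Do not pad with large unchanged regions.",
--     ),
--     "write": ("Use write only for new files or complete rewrites.",),
-- }
--
--
-- def _dedup(items):
--     # Sieve-style dedup: take the head, then purge every later copy of it
--     # before continuing -- no seen-set or dict is ever maintained.
--     out = []
--     rest = items
--     while rest:
--         head = rest[0]
--         out.append(head)
--         rest = [x for x in rest[1:] if x != head]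
--     return out
--
--
-- def _build_guidelines(selected_tools, extra_guidelines):
--     cands = []
--     if "bash" in selected_tools:
--         if "grep" in selected_tools or "find" in selected_tools or "ls" in selected_tools:
--             cands.append("Prefer grep/find/ls tools over bash for file exploration (faster, respects .gitignore)")
--         else:
--             cands.append("Use bash for file operations like ls, rg, find")
--     for name in selected_tools:
--         cands += PI_TOOL_GUIDELINES.get(name, ())
--     cands += [s for s in map(str.strip, extra_guidelines) if s]
--     cands += ["Be concise in your responses", "Show file paths clearly when working with files"]
--     return _dedup(cands)
-- ===== Notes on version B (the rewrite author's own statement) =====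
-- stated objective: alternative
-- what changed: B builds one flat candidate list (branch line, per-tool guidelines, stripped non-empty extras, two trailing constants) and deduplicates it with a sieve that repeatedly takes the head and filters all later copies out of the remainder, instead of A's incremental add-helper with a running seen-set.
import Mathlib
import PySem

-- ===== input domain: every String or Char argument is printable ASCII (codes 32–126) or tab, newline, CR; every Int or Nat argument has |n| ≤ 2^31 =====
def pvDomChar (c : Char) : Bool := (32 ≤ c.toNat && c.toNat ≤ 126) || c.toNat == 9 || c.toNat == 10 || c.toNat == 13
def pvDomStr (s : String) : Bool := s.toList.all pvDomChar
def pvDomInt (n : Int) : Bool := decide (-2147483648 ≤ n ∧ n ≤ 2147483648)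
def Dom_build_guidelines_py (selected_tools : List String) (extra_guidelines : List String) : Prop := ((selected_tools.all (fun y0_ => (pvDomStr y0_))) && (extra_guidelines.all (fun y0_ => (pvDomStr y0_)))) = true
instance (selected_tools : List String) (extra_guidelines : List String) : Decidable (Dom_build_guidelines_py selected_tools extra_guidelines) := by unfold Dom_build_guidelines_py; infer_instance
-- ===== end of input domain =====

-- B change (objective: alternative): B builds one flat candidate list and deduplicates it with a
-- head-and-filter sieve (no running seen-set), instead of A's incremental add-helper with a seen-set.

-- ===== PORT A =====
-- module constant PI_TOOL_GUIDELINES (a dict of tuples of strings)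
def pvPiToolGuidelines : PySem.Dict String (List String) :=
  PySem.Dict.ofList
    [ ("read", ["Use read to examine files instead of cat or sed."])
    , ("edit",
        [ "Use edit for precise changes (edits[].oldText must match exactly)"
        , "When changing multiple separate locations in one file, use one edit call with multiple entries in edits[] instead of multiple edit calls"
        , "Each edits[].oldText is matched against the original file, not after earlier edits are applied. Do not emit overlapping or nested edits. Merge nearby changes into one edit."
        , "Keep edits[].oldText as small as possible while still being unique in the file. Do not pad with large unchanged regions."])
    , ("write", ["Use write only for new files or complete rewrites."]) ]

-- A's inner helper `add` over the state (guidelines, seen)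
def pvAdd (st : List String × PySem.Set String) (g : String) : List String × PySem.Set String :=
  if PySem.Set.contains st.2 g then st else (st.1 ++ [g], PySem.Set.add st.2 g)

def build_guidelines_py (selected_tools : List String) (extra_guidelines : List String) : List String :=
  let st0 : List String × PySem.Set String := ([], PySem.Set.empty)
  let has_bash := selected_tools.contains "bash"
  let has_grep := selected_tools.contains "grep"
  let has_find := selected_tools.contains "find"
  let has_ls := selected_tools.contains "ls"
  let st1 :=
    if has_bash && !has_grep && !has_find && !has_ls then
      pvAdd st0 "Use bash for file operations like ls, rg, find"
    else if has_bash && (has_grep || has_find || has_ls) then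
      pvAdd st0 "Prefer grep/find/ls tools over bash for file exploration (faster, respects .gitignore)"
    else st0
  let st2 := selected_tools.foldl (fun st name => (pvPiToolGuidelines.getD name []).foldl pvAdd st) st1
  let st3 := extra_guidelines.foldl
      (fun st g => let normalized := PySem.Str.strip g
                   if normalized ≠ "" then pvAdd st normalized else st) st2
  let st4 := pvAdd st3 "Be concise in your responses"
  let st5 := pvAdd st4 "Show file paths clearly when working with files"
  st5.1

-- ===== PORT B =====
-- B's sieve dedup: take the head, filter every later copy out of the remainder, recurse.
def pvSieve : List String → List String
  | [] => []
  | a :: t => a :: pvSieve (t.filter (fun x => x ≠ a))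
termination_by l => l.length
decreasing_by
  simp only [List.length_cons, List.length_unattach]
  exact Nat.lt_succ_of_le (le_trans (List.length_filter_le _ _) (by simp))

def build_guidelines_py_alt (selected_tools : List String) (extra_guidelines : List String) : List String :=
  let branch :=
    if selected_tools.contains "bash" then
      if selected_tools.contains "grep" || selected_tools.contains "find" || selected_tools.contains "ls" then
        ["Prefer grep/find/ls tools over bash for file exploration (faster, respects .gitignore)"]
      else
        ["Use bash for file operations like ls, rg, find"]
    else []
  let cands :=
    branch
      ++ selected_tools.flatMap (fun name => pvPiToolGuidelines.getD name [])
      ++ (extra_guidelines.map PySem.Str.strip).filter (fun s => s ≠ "")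
      ++ ["Be concise in your responses", "Show file paths clearly when working with files"]
  pvSieve cands

-- ===== PRECONDITION & SPEC =====
def Spec_build_guidelines_py (selected_tools : List String) (extra_guidelines : List String) (out : List String) : Prop := out = build_guidelines_py_alt selected_tools extra_guidelines
instance (selected_tools : List String) (extra_guidelines : List String) (out : List String) : Decidable (Spec_build_guidelines_py selected_tools extra_guidelines out) := by unfold Spec_build_guidelines_py; infer_instance

-- ===== CLAIM =====
def Claim_equal_build_guidelines_py : Prop := ∀ (selected_tools : List String) (extra_guidelines : List String), Dom_build_guidelines_py selected_tools extra_guidelines → Spec_build_guidelines_py selected_tools extra_guidelines (build_guidelines_py selected_tools extra_guidelines)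

-- ===== LEMMAS AND PROOFS =====
-- On the diagonal (seen = guidelines) A's `add` is exactly Set.add on both components.
theorem pvAdd_diag (gs : List String) (g : String) :
    pvAdd (gs, gs) g = (PySem.Set.add gs g, PySem.Set.add gs g) := by
  by_cases h : g ∈ gs <;> simp [pvAdd, PySem.Set.add, h]

theorem foldl_pvAdd_diag (l : List String) (gs : List String) :
    l.foldl pvAdd (gs, gs) = (l.foldl PySem.Set.add gs, l.foldl PySem.Set.add gs) := by
  induction l generalizing gs with
  | nil => rfl
  | cons a t ih => simp [List.foldl_cons, pvAdd_diag, ih]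

-- A's tool loop, started on the diagonal, is a Set.add fold over the flatMap of guidelines.
theorem foldl_tools_diag (sel : List String) (gs : List String) :
    sel.foldl (fun st name => (pvPiToolGuidelines.getD name []).foldl pvAdd st) (gs, gs)
      = ((sel.flatMap (fun name => pvPiToolGuidelines.getD name [])).foldl PySem.Set.add gs,
         (sel.flatMap (fun name => pvPiToolGuidelines.getD name [])).foldl PySem.Set.add gs) := by
  induction sel generalizing gs with
  | nil => rfl
  | cons a t ih =>
      simp only [List.foldl_cons, List.flatMap_cons, List.foldl_append, foldl_pvAdd_diag]
      exact ih _

-- A's extras loop, started on the diagonal, is a Set.add fold over the stripped non-empty extras.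
theorem foldl_extras_diag (ext : List String) (gs : List String) :
    ext.foldl (fun st g => if PySem.Str.strip g = "" then st else pvAdd st (PySem.Str.strip g)) (gs, gs)
      = (((ext.map PySem.Str.strip).filter (fun s => s ≠ "")).foldl PySem.Set.add gs,
         ((ext.map PySem.Str.strip).filter (fun s => s ≠ "")).foldl PySem.Set.add gs) := by
  induction ext generalizing gs with
  | nil => rfl
  | cons a t ih =>
      rw [List.foldl_cons, List.map_cons, List.filter_cons]
      by_cases h : PySem.Str.strip a = ""
      · rw [if_pos h, ih]
        simp [h]
      · rw [if_neg h, pvAdd_diag, ih]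
        simp [h]

-- Folding Set.add skips elements already in the accumulator, so filtering them out first is harmless.
theorem foldl_add_filter (l : List String) (s : List String) (a : String) (ha : a ∈ s) :
    l.foldl PySem.Set.add s = (l.filter (fun x => x ≠ a)).foldl PySem.Set.add s := by
  induction l generalizing s with
  | nil => rfl
  | cons b t ih =>
      rw [List.foldl_cons, List.filter_cons]
      by_cases hb : b = a
      · subst hb
        have : PySem.Set.add s b = s := by simp [PySem.Set.add, ha]
        simp only [this, decide_not]
        simp [ih s ha]
      · rw [if_pos (by simp [hb])]
        rw [List.foldl_cons]
        exact ih _ (by by_cases h : b ∈ s <;> simp [PySem.Set.add, h, ha])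

-- Set.add appends at the end, so an element absent from l can be pulled out of the accumulator.
theorem foldl_add_cons (l : List String) (s : List String) (a : String) (ha : a ∉ l) :
    l.foldl PySem.Set.add (a :: s) = a :: l.foldl PySem.Set.add s := by
  induction l generalizing s with
  | nil => rfl
  | cons b t ih =>
      have hb : b ≠ a := fun h => ha (h ▸ List.mem_cons_self ..)
      have ha' : a ∉ t := fun h => ha (List.mem_cons_of_mem _ h)
      rw [List.foldl_cons, List.foldl_cons]
      by_cases h : b ∈ s
      · have h1 : PySem.Set.add (a :: s) b = a :: s := by
          simp [PySem.Set.add, List.mem_cons, h]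
        have h2 : PySem.Set.add s b = s := by simp [PySem.Set.add, h]
        rw [h1, h2, ih _ ha']
      · have h1 : PySem.Set.add (a :: s) b = a :: (s ++ [b]) := by
          simp [PySem.Set.add, List.mem_cons, h, hb]
        have h2 : PySem.Set.add s b = s ++ [b] := by simp [PySem.Set.add, h]
        rw [h1, h2, ih _ ha']

-- The sieve computes exactly set(...)-in-first-occurrence-order, i.e. foldl Set.add [].
theorem pvSieve_eq_ofList_aux (n : Nat) : ∀ l : List String, l.length ≤ n → pvSieve l = l.foldl PySem.Set.add [] := by
  induction n with
  | zero =>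
      intro l hl
      rw [List.length_eq_zero_iff.mp (Nat.le_zero.mp hl)]
      simp [pvSieve]
  | succ n ih =>
      intro l hl
      cases l with
      | nil => simp [pvSieve]
      | cons a t =>
          have ht : (t.filter (fun x => x ≠ a)).length ≤ n :=
            le_trans (List.length_filter_le _ _) (Nat.succ_le_succ_iff.mp hl)
          rw [show pvSieve (a :: t) = a :: pvSieve (t.filter (fun x => x ≠ a)) from by rw [pvSieve],
             ih _ ht, List.foldl_cons]
          have h0 : PySem.Set.add ([] : List String) a = [a] := by simp [PySem.Set.add]
          rw [h0, foldl_add_filter t [a] a (List.mem_singleton_self a)]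
          rw [foldl_add_cons _ _ _ (by simp)]

theorem pvSieve_eq_ofList (l : List String) : pvSieve l = l.foldl PySem.Set.add [] :=
  pvSieve_eq_ofList_aux l.length l le_rfl

-- ===== VERDICT =====
theorem build_guidelines_py_spec : Claim_equal_build_guidelines_py := by
  intro sel ext _
  unfold Spec_build_guidelines_py build_guidelines_py build_guidelines_py_alt
  simp only [pvSieve_eq_ofList, List.foldl_append]
  by_cases hb : "bash" ∈ sel <;>
    by_cases hg : "grep" ∈ sel <;>
      by_cases hf : "find" ∈ sel <;>
        by_cases hl : "ls" ∈ sel <;>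
          simp [hb, hg, hf, hl, pvAdd_diag, foldl_tools_diag, foldl_extras_diag,
            PySem.Set.empty, PySem.Set.add, List.foldl_cons]
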